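-- pv_equiv track=rewrite | github.com/FilipNedeljkovic/Minimum-sorting-by-reversals | basic_algorithms.py | improving_reversals
-- ===== SOURCE A (Python) =====
-- def count_breakpoints(permutation) -> int:
--     n = len(permutation)
--     extended_perm = (0,) + permutation + (n + 1,)
--     num_bp = 0
--
--     for i in range(len(extended_perm) - 1):
--         if abs(extended_perm[i] - extended_perm[i + 1]) != 1:
--             num_bp += 1
--
--     return num_bp
--
-- def improving_reversals(permutation):
--     n = len(permutation)
--     extended = (0,) + permutation + (n + 1,)
--     current_bp = count_breakpoints(permutation)
--     candidates = []
--
--     for i in range(n - 1):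
--         if abs(extended[i] - extended[i + 1]) != 1:
--             for j in range(i + 1, n):
--                 new_perm = permutation[:i] + permutation[i:j+1][::-1] + permutation[j+1:]
--                 if count_breakpoints(new_perm) < current_bp:
--                     candidates.append((i, j))
--
--     return candidates
-- ===== SOURCE B (Python) =====
-- def improving_reversals(permutation):
--     n = len(permutation)
--     extended = (0,) + tuple(permutation) + (n + 1,)
--
--     def bp(a, b):
--         return 1 if abs(a - b) != 1 else 0
--
--     candidates = []
--     for i in range(n - 1):
--         u, a = extended[i], extended[i + 1]
--         if bp(u, a):
--             for j in range(i + 1, n):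
--                 b, w = extended[j + 1], extended[j + 2]
--                 # reversing permutation[i:j+1] only changes the two boundary adjacencies
--                 if bp(u, b) + bp(a, w) < bp(u, a) + bp(b, w):
--                     candidates.append((i, j))
--     return candidates
-- ===== Notes on version B (the rewrite author's own statement) =====
-- stated objective: faster
-- what changed: Instead of rebuilding each candidate reversal and recounting all breakpoints of the new permutation (O(n) per pair), B tests each pair (i,j) by an O(1) delta computed from the four elements at the two reversal boundaries, since reversing a segment only changes the two boundary adjacencies.
import Mathlib
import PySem

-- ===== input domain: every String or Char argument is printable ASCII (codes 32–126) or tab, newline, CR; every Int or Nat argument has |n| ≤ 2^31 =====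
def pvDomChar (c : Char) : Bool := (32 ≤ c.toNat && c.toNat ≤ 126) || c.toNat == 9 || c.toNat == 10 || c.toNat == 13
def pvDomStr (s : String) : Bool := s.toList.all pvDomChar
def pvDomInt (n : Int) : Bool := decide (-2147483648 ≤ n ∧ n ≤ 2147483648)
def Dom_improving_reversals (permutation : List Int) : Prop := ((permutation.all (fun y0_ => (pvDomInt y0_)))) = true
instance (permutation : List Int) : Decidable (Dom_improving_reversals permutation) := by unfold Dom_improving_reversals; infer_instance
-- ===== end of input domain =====

-- B replaces A's full breakpoint recount of every candidate reversal (O(n) per (i,j) pair) by an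
-- O(1) local delta computed from the two reversal boundaries; objective: faster (asymptotic).

-- ===== PORT A =====
def count_breakpoints (permutation : List Int) : Int :=
  let n : Int := permutation.length
  let extended_perm : List Int := 0 :: (permutation ++ [n + 1])
  (PySem.List.pyRange 0 ((extended_perm.length : Int) - 1) 1).foldl
    (fun num_bp i =>
      if (PySem.List.pyGetD extended_perm i 0 - PySem.List.pyGetD extended_perm (i + 1) 0).natAbs ≠ 1
      then num_bp + 1 else num_bp) 0

def improving_reversals (permutation : List Int) : List (List Int) :=
  let n : Int := permutation.length
  let extended : List Int := 0 :: (permutation ++ [n + 1])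
  let current_bp := count_breakpoints permutation
  (PySem.List.pyRange 0 (n - 1) 1).foldl
    (fun candidates i =>
      if (PySem.List.pyGetD extended i 0 - PySem.List.pyGetD extended (i + 1) 0).natAbs ≠ 1 then
        (PySem.List.pyRange (i + 1) n 1).foldl
          (fun candidates j =>
            -- permutation[i:j+1][::-1] is the reverse of the slice (PySem.List.slice?_none_none_neg_one)
            let new_perm := PySem.List.slice permutation none (some i)
              ++ (PySem.List.slice permutation (some i) (some (j + 1))).reverse
              ++ PySem.List.slice permutation (some (j + 1)) none
            if count_breakpoints new_perm < current_bp then candidates ++ [[i, j]] else candidates)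
          candidates
      else candidates) []

-- ===== PORT B =====
def pvBp (a b : Int) : Int := if (a - b).natAbs ≠ 1 then 1 else 0

def improving_reversals_alt (permutation : List Int) : List (List Int) :=
  let n : Int := permutation.length
  let extended : List Int := 0 :: (permutation ++ [n + 1])
  (PySem.List.pyRange 0 (n - 1) 1).foldl
    (fun candidates i =>
      let u := PySem.List.pyGetD extended i 0
      let a := PySem.List.pyGetD extended (i + 1) 0
      if pvBp u a ≠ 0 then
        (PySem.List.pyRange (i + 1) n 1).foldl
          (fun candidates j =>
            let b := PySem.List.pyGetD extended (j + 1) 0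
            let w := PySem.List.pyGetD extended (j + 2) 0
            if pvBp u b + pvBp a w < pvBp u a + pvBp b w then candidates ++ [[i, j]] else candidates)
          candidates
      else candidates) []

-- ===== PRECONDITION & SPEC =====
def Spec_improving_reversals (permutation : List Int) (out : List (List Int)) : Prop := out = improving_reversals_alt permutation
instance (permutation : List Int) (out : List (List Int)) : Decidable (Spec_improving_reversals permutation out) := by unfold Spec_improving_reversals; infer_instance

-- ===== CLAIM (what is proved, stated in full; the proofs are below) =====
def Claim_equal_improving_reversals : Prop := ∀ (permutation : List Int), Dom_improving_reversals permutation → Spec_improving_reversals permutation (improving_reversals permutation)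

-- ===== LEMMAS AND PROOFS =====

/-- Breakpoint count of a list, summed over adjacent pairs. -/
def pvC : List Int → Int
  | [] => 0
  | [_] => 0
  | a :: b :: t => pvBp a b + pvC (b :: t)

theorem pvBp_comm (a b : Int) : pvBp a b = pvBp b a := by
  unfold pvBp
  have : (a - b).natAbs = (b - a).natAbs := by omega
  rw [this]

theorem pvC_cons_cons (a b : Int) (t : List Int) :
    pvC (a :: b :: t) = pvBp a b + pvC (b :: t) := rfl

theorem sumAdj : ∀ (e : List Int),
    ((List.range (e.length - 1)).map (fun k => pvBp (e.getD k 0) (e.getD (k+1) 0))).sum = pvC e := by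
  intro e
  induction e with
  | nil => simp [pvC]
  | cons x t ih =>
    cases t with
    | nil => simp [pvC]
    | cons y t' =>
      have h : (x :: y :: t').length - 1 = ((y :: t').length - 1) + 1 := by simp
      rw [h, List.range_succ_eq_map, List.map_cons, List.map_map, List.sum_cons, pvC_cons_cons,
        ← ih]
      simp [Function.comp_def]

theorem cb_eq (p : List Int) :
    count_breakpoints p = pvC (0 :: (p ++ [(p.length : Int) + 1])) := by
  unfold count_breakpoints
  dsimp only
  set e : List Int := 0 :: (p ++ [(p.length : Int) + 1]) with he
  have hlen : ((e.length : Int) - 1) = ((p.length + 1 : Nat) : Int) := by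
    simp [he]
  rw [hlen, PySem.List.pyRange_zero_nat, List.foldl_map]
  have hbody : (fun (acc : Int) (k : Nat) =>
      if (PySem.List.pyGetD e (↑k) 0 - PySem.List.pyGetD e (↑k + 1) 0).natAbs ≠ 1 then acc + 1 else acc)
      = (fun (acc : Int) (k : Nat) => acc + pvBp (e.getD k 0) (e.getD (k+1) 0)) := by
    funext acc k
    have h1 : ((k : Int) + 1) = ((k + 1 : Nat) : Int) := by push_cast; ring
    rw [h1, PySem.List.pyGetD_natCast, PySem.List.pyGetD_natCast]
    unfold pvBp
    split_ifs <;> omega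
  rw [hbody, PySem.List.foldl_add, zero_add]
  have hlen2 : p.length + 1 = e.length - 1 := by simp [he]
  rw [hlen2, sumAdj]

theorem pvC_append_cons : ∀ (xs : List Int) (a : Int) (ys : List Int),
    pvC (xs ++ a :: ys) = pvC (xs ++ [a]) + pvC (a :: ys) := by
  intro xs
  induction xs with
  | nil => intro a ys; simp [pvC]
  | cons x xs ih =>
    intro a ys
    cases xs with
    | nil => simp [pvC]
    | cons x2 xs2 =>
      have h1 : (x :: x2 :: xs2) ++ a :: ys = x :: x2 :: (xs2 ++ a :: ys) := by simp
      have h2 : (x :: x2 :: xs2) ++ [a] = x :: x2 :: (xs2 ++ [a]) := by simp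
      rw [h1, h2, pvC_cons_cons, pvC_cons_cons]
      have := ih a ys
      simp only [List.cons_append] at this ⊢
      omega

theorem pvC_snoc : ∀ (t : List Int) (x a : Int),
    pvC ((x :: t) ++ [a]) = pvC (x :: t) + pvBp ((x :: t).getLast (by simp)) a := by
  intro t
  induction t with
  | nil => intro x a; simp [pvC]
  | cons y t' ih =>
    intro x a
    have h1 : (x :: y :: t') ++ [a] = x :: ((y :: t') ++ [a]) := by simp
    rw [h1]
    have h2 : pvC (x :: ((y :: t') ++ [a])) = pvBp x y + pvC ((y :: t') ++ [a]) := by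
      simp only [List.cons_append, pvC_cons_cons]
    rw [h2, ih, pvC_cons_cons, List.getLast_cons (by simp : (y :: t') ≠ [])]
    ring

theorem pvC_snoc' (ys : List Int) (a : Int) (h : ys ≠ []) :
    pvC (ys ++ [a]) = pvC ys + pvBp (ys.getLast h) a := by
  obtain ⟨x, t, rfl⟩ := List.exists_cons_of_ne_nil h
  exact pvC_snoc t x a

theorem pvC_reverse : ∀ (l : List Int), pvC l.reverse = pvC l := by
  intro l
  induction l with
  | nil => rfl
  | cons x t ih =>
    cases t with
    | nil => rfl
    | cons y t' =>
      have hne : (y :: t').reverse ≠ [] := by simp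
      rw [List.reverse_cons, pvC_snoc' _ _ hne, ih, List.getLast_reverse, pvC_cons_cons]
      have : (y :: t').head (by simp) = y := rfl
      rw [this, pvBp_comm]
      ring

theorem pvC_block (A0 M T : List Int) (hA : A0 ≠ []) (hM : M ≠ []) (hT : T ≠ []) :
    pvC (A0 ++ M ++ T) = pvC A0 + pvBp (A0.getLast hA) (M.head hM) + pvC M
      + pvBp (M.getLast hM) (T.head hT) + pvC T := by
  obtain ⟨a, M', rfl⟩ := List.exists_cons_of_ne_nil hM
  obtain ⟨w, T', rfl⟩ := List.exists_cons_of_ne_nil hT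
  have h1 : A0 ++ (a :: M') ++ (w :: T') = A0 ++ a :: (M' ++ w :: T') := by simp
  rw [h1, pvC_append_cons A0 a (M' ++ w :: T'), pvC_snoc' A0 a hA]
  have h2 : a :: (M' ++ w :: T') = (a :: M') ++ w :: T' := by simp
  rw [h2, pvC_append_cons (a :: M') w T', pvC_snoc (t := M') (x := a) (a := w)]
  simp only [List.head_cons]
  ring

theorem getD_append_last (L R : List Int) (hL : L ≠ []) (d : Int) :
    (L ++ R).getD (L.length - 1) d = L.getLast hL := by
  have hpos : 0 < L.length := List.length_pos_of_ne_nil hL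
  have h1 : L.length - 1 < (L ++ R).length := by simp; omega
  rw [List.getD_eq_getElem _ _ h1, List.getElem_append_left (by omega), List.getLast_eq_getElem]

theorem getD_append_head (L R : List Int) (hR : R ≠ []) (d : Int) :
    (L ++ R).getD L.length d = R.head hR := by
  have hpos : 0 < R.length := List.length_pos_of_ne_nil hR
  have h1 : L.length < (L ++ R).length := by simp; omega
  rw [List.getD_eq_getElem _ _ h1, List.getElem_append_right (le_refl _), List.head_eq_getElem]
  simp

/-- The key fact: A's recount comparison for reversal (ii,jj) equals B's local boundary delta test. -/
theorem key_iff (perm : List Int) (ii jj : Nat) (hij : ii < jj) (hj : jj < perm.length) :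
    (count_breakpoints (perm.take ii ++ ((perm.drop ii).take (jj + 1 - ii)).reverse ++ perm.drop (jj + 1))
        < count_breakpoints perm)
      ↔ (pvBp ((0 :: (perm ++ [(perm.length : Int) + 1])).getD ii 0) ((0 :: (perm ++ [(perm.length : Int) + 1])).getD (jj+1) 0)
          + pvBp ((0 :: (perm ++ [(perm.length : Int) + 1])).getD (ii+1) 0) ((0 :: (perm ++ [(perm.length : Int) + 1])).getD (jj+2) 0)
        < pvBp ((0 :: (perm ++ [(perm.length : Int) + 1])).getD ii 0) ((0 :: (perm ++ [(perm.length : Int) + 1])).getD (ii+1) 0)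
          + pvBp ((0 :: (perm ++ [(perm.length : Int) + 1])).getD (jj+1) 0) ((0 :: (perm ++ [(perm.length : Int) + 1])).getD (jj+2) 0)) := by
  set n : Int := (perm.length : Int) with hn
  set P : List Int := perm.take ii with hP
  set M : List Int := (perm.drop ii).take (jj + 1 - ii) with hM
  set S : List Int := perm.drop (jj + 1) with hS
  have hMS : M ++ S = perm.drop ii := by
    have h1 : S = (perm.drop ii).drop (jj + 1 - ii) := by
      rw [hS, List.drop_drop]; congr 1; omega
    rw [hM, h1, List.take_append_drop]
  have hperm : P ++ (M ++ S) = perm := by rw [hMS, hP, List.take_append_drop]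
  have hPlen : P.length = ii := by rw [hP]; simp [List.length_take]; omega
  have hMlen : M.length = jj + 1 - ii := by rw [hM]; simp [List.length_take, List.length_drop]; omega
  have hMne : M ≠ [] := by
    intro h; rw [h] at hMlen; simp at hMlen; omega
  have hMrne : M.reverse ≠ [] := by simp [hMne]
  have hTne : S ++ [n + 1] ≠ [] := by simp
  have hext : (0 : Int) :: (perm ++ [n + 1]) = ((0 : Int) :: P) ++ M ++ (S ++ [n + 1]) := by
    conv_lhs => rw [← hperm]
    simp
  -- the four boundary lookups
  have hE1len : ((0 : Int) :: P).length = ii + 1 := by simp [hPlen]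
  have hE2len : (((0 : Int) :: P) ++ M).length = jj + 2 := by
    simp [hPlen, hMlen]; omega
  have hu : ((0 : Int) :: (perm ++ [n + 1])).getD ii 0 = ((0 : Int) :: P).getLast (by simp) := by
    rw [hext]
    have h1 : ((0 : Int) :: P) ++ M ++ (S ++ [n + 1]) = ((0 : Int) :: P) ++ (M ++ (S ++ [n + 1])) := by simp
    rw [h1, show ii = ((0 : Int) :: P).length - 1 by omega, getD_append_last]
  have ha : ((0 : Int) :: (perm ++ [n + 1])).getD (ii + 1) 0 = M.head hMne := by
    rw [hext]
    have h1 : ((0 : Int) :: P) ++ M ++ (S ++ [n + 1]) = ((0 : Int) :: P) ++ (M ++ (S ++ [n + 1])) := by simp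
    rw [h1, show ii + 1 = ((0 : Int) :: P).length by omega,
      getD_append_head _ _ (by simp [hMne])]
    rw [List.head_append]
    simp [hMne]
  have hb : ((0 : Int) :: (perm ++ [n + 1])).getD (jj + 1) 0 = M.getLast hMne := by
    rw [hext, show jj + 1 = (((0 : Int) :: P) ++ M).length - 1 by omega,
      getD_append_last _ _ (by simp)]
    rw [List.getLast_append]
    simp [hMne]
  have hw : ((0 : Int) :: (perm ++ [n + 1])).getD (jj + 2) 0 = (S ++ [n + 1]).head hTne := by
    rw [hext, show jj + 2 = (((0 : Int) :: P) ++ M).length by omega,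
      getD_append_head _ _ hTne]
  -- the two breakpoint counts
  have hlen_new : ((P ++ M.reverse ++ S).length : Int) = n := by
    have h1 := congrArg List.length hperm
    simp only [List.length_append] at h1
    simp only [List.length_append, List.length_reverse]
    omega
  have hold : count_breakpoints perm
      = pvC ((0 : Int) :: P) + pvBp (((0 : Int) :: P).getLast (by simp)) (M.head hMne) + pvC M
        + pvBp (M.getLast hMne) ((S ++ [n + 1]).head hTne) + pvC (S ++ [n + 1]) := by
    rw [cb_eq, ← hn, hext, pvC_block _ _ _ (by simp) hMne hTne]
  have hnew : count_breakpoints (P ++ M.reverse ++ S)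
      = pvC ((0 : Int) :: P) + pvBp (((0 : Int) :: P).getLast (by simp)) (M.getLast hMne) + pvC M
        + pvBp (M.head hMne) ((S ++ [n + 1]).head hTne) + pvC (S ++ [n + 1]) := by
    rw [cb_eq, hlen_new]
    have h1 : (0 : Int) :: (P ++ M.reverse ++ S ++ [n + 1]) = ((0 : Int) :: P) ++ M.reverse ++ (S ++ [n + 1]) := by
      simp
    rw [h1, pvC_block _ _ _ (by simp) hMrne hTne, pvC_reverse,
      List.head_reverse, List.getLast_reverse]
  rw [hold, hnew, hu, ha, hb, hw]
  constructor <;> intro h <;> omega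

-- ===== VERDICT (by name: the statement is the Claim_ definition above) =====
theorem pvBp_ne_zero_iff (u a : Int) : pvBp u a ≠ 0 ↔ (u - a).natAbs ≠ 1 := by
  unfold pvBp; split_ifs with h <;> simp [h]

theorem improving_reversals_spec : Claim_equal_improving_reversals := by
  intro perm _
  unfold Spec_improving_reversals improving_reversals improving_reversals_alt
  dsimp only
  apply PySem.List.foldl_congr_mem
  intro acc i hi
  rw [PySem.List.mem_pyRange_one] at hi
  obtain ⟨hi0, hin⟩ := hi
  lift i to ℕ using hi0 with ii
  refine if_congr (Iff.symm (pvBp_ne_zero_iff _ _)) ?_ rfl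
  apply PySem.List.foldl_congr_mem
  intro acc2 j hj
  rw [PySem.List.mem_pyRange_one] at hj
  obtain ⟨hj1, hj2⟩ := hj
  lift j to ℕ using (by omega : (0:Int) ≤ j) with jj
  refine if_congr ?_ rfl rfl
  have hij : ii < jj := by exact_mod_cast (by omega : (ii : Int) < jj)
  have hjlt : jj < perm.length := by exact_mod_cast hj2
  have hc1 : ((jj : Int) + 1) = ((jj + 1 : Nat) : Int) := by push_cast; ring
  have hc2 : ((ii : Int) + 1) = ((ii + 1 : Nat) : Int) := by push_cast; ring
  have hc3 : ((jj : Int) + 2) = ((jj + 2 : Nat) : Int) := by push_cast; ring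
  rw [hc1, hc2, hc3, PySem.List.slice_to_natCast, PySem.List.slice_natCast,
    PySem.List.slice_from_natCast, PySem.List.pyGetD_natCast, PySem.List.pyGetD_natCast,
    PySem.List.pyGetD_natCast, PySem.List.pyGetD_natCast]
  exact key_iff perm ii jj hij hjlt
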